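-- pv_equiv track=rewrite | github.com/F-ONE-Group/business_rules_engine | rules_engine/utils/variables_mutations.py | parse_mutation_key_value
-- ===== SOURCE A (Python) =====
-- from typing import Any, Dict, List, Tuple, Union
--
-- def parse_mutation_key_value(mutation_key: str, variable_mutation: str):
--     mutation_keys: List[str] = mutation_key.split(".")
--
--     parsed_mutation = {}
--     current_idx = 0
--     for idx, m in enumerate(mutation_keys):
--         if idx < len(mutation_keys) - 1:
--             next_idx = variable_mutation.find(mutation_keys[idx + 1])
--             parsed_mutation[m] = f"{variable_mutation[current_idx:next_idx -1]}"
--             current_idx = next_idx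
--         else:
--             parsed_mutation[m] = f"{variable_mutation[current_idx:]}"
--
--     return parsed_mutation
-- ===== SOURCE B (Python) =====
-- def parse_mutation_key_value(mutation_key: str, variable_mutation: str):
--     def pairs(ks, start):
--         k, *rest = ks
--         if not rest:
--             return [(k, variable_mutation[start:])]
--         nxt = variable_mutation.find(rest[0])
--         return [(k, variable_mutation[start:nxt - 1])] + pairs(rest, nxt)
--     return dict(pairs(mutation_key.split("."), 0))
-- ===== Notes on version B (the rewrite author's own statement) =====
-- stated objective: alternative
-- what changed: Replaced A's single iterative loop that mutates one dict while threading current_idx with a recursive decomposition that builds the (key, slice) association pairs as a list, back through the recursion, and converts them with one dict() call at the end.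
import Mathlib
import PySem

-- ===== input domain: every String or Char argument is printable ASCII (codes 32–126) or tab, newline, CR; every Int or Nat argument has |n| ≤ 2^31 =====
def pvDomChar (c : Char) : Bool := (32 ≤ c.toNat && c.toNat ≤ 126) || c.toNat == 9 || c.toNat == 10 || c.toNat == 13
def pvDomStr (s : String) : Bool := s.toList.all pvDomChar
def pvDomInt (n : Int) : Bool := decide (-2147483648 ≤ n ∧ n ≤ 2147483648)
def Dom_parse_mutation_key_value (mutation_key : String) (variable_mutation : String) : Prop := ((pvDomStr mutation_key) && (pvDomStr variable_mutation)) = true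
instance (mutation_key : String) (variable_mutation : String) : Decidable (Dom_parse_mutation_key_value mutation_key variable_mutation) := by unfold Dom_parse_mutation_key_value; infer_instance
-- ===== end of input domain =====

-- B replaces A's iterative loop mutating one dict while threading current_idx with a
-- recursion that returns the (key, slice) pairs as a list, converted by one dict() at
-- the end; objective: alternative decomposition, same cost.

-- ===== PORT A =====
-- A's for-loop over enumerate(mutation_keys): the state is (dict, current_idx); the
-- branch 'idx < len(keys) - 1' is exactly 'the key has a successor', so the loop is the
-- structural recursion on the key list below.
def pvLoopA (vm : String) : List String → Int → PySem.Dict String String → PySem.Dict String String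
  | [], _, d => d
  | [m], cur, d => d.insert m (PySem.Str.slice vm (some cur) none)
  | m :: m2 :: rest, cur, d =>
      let next := PySem.Str.find vm m2
      pvLoopA vm (m2 :: rest) next (d.insert m (PySem.Str.slice vm (some cur) (some (next - 1))))

def parse_mutation_key_value (mutation_key : String) (variable_mutation : String) : List (String × String) :=
  -- '.'.split never raises (separator is non-empty), so the getD default is never used
  let mutation_keys := (PySem.Str.split? mutation_key ".").getD []
  (pvLoopA variable_mutation mutation_keys 0 PySem.Dict.empty).items

-- ===== PORT B =====
-- B's recursive helper pairs(ks, start): `k, *rest = ks` on an empty ks would raise in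
-- Python, but split('.') never returns []; the [] case here is that unreachable branch.
def pvPairsB (vm : String) : List String → Int → List (String × String)
  | [], _ => []
  | [k], start => [(k, PySem.Str.slice vm (some start) none)]
  | k :: k2 :: rest, start =>
      let nxt := PySem.Str.find vm k2
      [(k, PySem.Str.slice vm (some start) (some (nxt - 1)))] ++ pvPairsB vm (k2 :: rest) nxt

def parse_mutation_key_value_alt (mutation_key : String) (variable_mutation : String) : List (String × String) :=
  (PySem.Dict.ofList (pvPairsB variable_mutation ((PySem.Str.split? mutation_key ".").getD []) 0)).items

-- ===== PRECONDITION & SPEC =====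
def Spec_parse_mutation_key_value (mutation_key : String) (variable_mutation : String) (out : List (String × String)) : Prop := out = parse_mutation_key_value_alt mutation_key variable_mutation
instance (mutation_key : String) (variable_mutation : String) (out : List (String × String)) : Decidable (Spec_parse_mutation_key_value mutation_key variable_mutation out) := by unfold Spec_parse_mutation_key_value; infer_instance

-- ===== CLAIM (what is proved, stated in full; the proofs are below) =====
def Claim_equal_parse_mutation_key_value : Prop := ∀ (mutation_key : String) (variable_mutation : String), Dom_parse_mutation_key_value mutation_key variable_mutation → Spec_parse_mutation_key_value mutation_key variable_mutation (parse_mutation_key_value mutation_key variable_mutation)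

-- ===== LEMMAS AND PROOFS =====

-- A's loop starting from d is exactly replaying B's pair list into d
theorem pv_loop_eq_foldl_pairs (vm : String) :
    ∀ (ks : List String) (cur : Int) (d : PySem.Dict String String),
      pvLoopA vm ks cur d =
        (pvPairsB vm ks cur).foldl (fun d p => d.insert p.1 p.2) d := by
  intro ks
  induction ks with
  | nil => intro cur d; simp [pvLoopA, pvPairsB]
  | cons k rest ih =>
    intro cur d
    cases rest with
    | nil => simp [pvLoopA, pvPairsB]
    | cons k2 rest' =>
      rw [pvLoopA, pvPairsB]
      simp only [List.singleton_append, List.foldl_cons]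
      exact ih _ _

theorem parse_mutation_eq (mutation_key : String) (variable_mutation : String) :
    parse_mutation_key_value mutation_key variable_mutation =
      parse_mutation_key_value_alt mutation_key variable_mutation := by
  show (pvLoopA variable_mutation ((PySem.Str.split? mutation_key ".").getD []) 0 PySem.Dict.empty).items = _
  -- dict(pairs) is the fold of insert over the pairs, which lemma pv_loop_eq_foldl_pairs
  -- identifies with A's loop (PySem.Dict.ofList unfolds to that fold definitionally)
  rw [pv_loop_eq_foldl_pairs]
  rfl

-- ===== VERDICT (by name: the statement is the Claim_ definition above) =====
theorem parse_mutation_key_value_spec : Claim_equal_parse_mutation_key_value := by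
  intro mk vm _
  unfold Spec_parse_mutation_key_value
  exact parse_mutation_eq mk vm
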